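-- pv_equiv track=rewrite | github.com/Navadeepram23/AI-LAB-ASSIGNMENTS | KS.PY | repair_chromosome
-- ===== SOURCE A (Python) =====
-- capacity = 50
--
-- weights = [10, 20, 30, 40, 50]
--
-- values = [30, 70, 110, 150, 190]
--
-- def repair_chromosome(chromosome):
--     while sum(gene * wt for gene, wt in zip(chromosome, weights)) > capacity:
--         ones_indices = [i for i, gene in enumerate(chromosome) if gene == 1]
--         if not ones_indices:
--             break
--         worst_idx = min(ones_indices, key=lambda i: values[i] / weights[i])
--         chromosome[worst_idx] = 0
--     return chromosome
-- ===== SOURCE B (Python) =====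
-- capacity = 50
--
-- weights = [10, 20, 30, 40, 50]
--
-- values = [30, 70, 110, 150, 190]
--
-- def repair_chromosome(chromosome):
--     # The value/weight ratios of the five items are strictly increasing with the
--     # index, so the "worst" removable item is always the lowest-indexed gene
--     # that equals 1: one left-to-right pass with a running total suffices.
--     total = sum(g * w for g, w in zip(chromosome, weights))
--     for i, w in enumerate(weights[:len(chromosome)]):
--         if total <= capacity:
--             break
--         if chromosome[i] == 1:
--             chromosome[i] = 0
--             total -= w
--     return chromosome
-- ===== Notes on version B (the rewrite author's own statement) =====
-- stated objective: simpler
-- what changed: A's while-loop that rescans for ones and takes a min-by-ratio each iteration is replaced by a single left-to-right pass with a running weight total, valid because the five value/weight ratios are strictly increasing with the index, so the worst removable gene is always the lowest-indexed 1.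
import Mathlib
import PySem

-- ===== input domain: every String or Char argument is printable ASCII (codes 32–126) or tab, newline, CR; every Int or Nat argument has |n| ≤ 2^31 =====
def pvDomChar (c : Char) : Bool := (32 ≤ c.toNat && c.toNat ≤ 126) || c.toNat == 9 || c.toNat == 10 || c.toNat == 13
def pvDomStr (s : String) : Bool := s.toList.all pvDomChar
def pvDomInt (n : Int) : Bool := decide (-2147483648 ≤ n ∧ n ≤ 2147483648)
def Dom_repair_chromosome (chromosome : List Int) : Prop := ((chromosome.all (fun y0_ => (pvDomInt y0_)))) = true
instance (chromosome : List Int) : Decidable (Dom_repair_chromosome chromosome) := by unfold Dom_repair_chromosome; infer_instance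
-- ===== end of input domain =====

-- B replaces A's repeated min-by-ratio rescans with one left-to-right pass carrying a running
-- weight total (the five ratios are strictly increasing, so the worst gene is the leftmost 1);
-- both versions mutate the Python list in place identically on Pre_, and the theorems are about
-- the returned value.


-- ===== PORT A =====
def pvCapacity : Int := 50
def pvWeights : List Int := [10, 20, 30, 40, 50]
def pvValues : List Int := [30, 70, 110, 150, 190]

-- sum(gene * wt for gene, wt in zip(chromosome, weights))  (shared: the same expression occurs in both sources)
def pvWeightedSum (c : List Int) : Int := (c.zip pvWeights).foldl (fun s p => s + p.1 * p.2) 0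

-- [i for i, gene in enumerate(chromosome) if gene == 1]
def pvOnes (c : List Int) : List Int :=
  (PySem.List.enumerate c 0).filterMap (fun p => if p.2 = 1 then some p.1 else none)

-- lambda i: values[i] / weights[i] — Python compares floats; ported as exact rationals, which
-- order these five literal quotients identically (exact on the in-range indices Pre_ admits).
def pvKey (i : Int) : ℚ :=
  ((PySem.List.pyGetD pvValues i 0 : Int) : ℚ) / ((PySem.List.pyGetD pvWeights i 1 : Int) : ℚ)

-- the while-loop; fuel only makes it total (each removal zeroes a 1, so length+1 steps suffice)
def pvLoopA : Nat → List Int → List Int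
  | 0, c => c
  | f + 1, c =>
    if pvCapacity < pvWeightedSum c then
      match PySem.List.min? (pvOnes c) pvKey with
      | none => c                                   -- if not ones_indices: break
      | some worst => pvLoopA f (PySem.List.pySetD c worst 0)
    else c

def repair_chromosome (chromosome : List Int) : List Int :=
  pvLoopA (chromosome.length + 1) chromosome

-- ===== PORT B =====
-- for i, w in enumerate(weights[:len(chromosome)]): … — i is in range of chromosome by
-- construction, so pyGetD/pySetD are exact here.
def pvLoopB : List (Int × Int) → Int → List Int → List Int
  | [], _, c => c
  | (i, w) :: rest, total, c =>
    if total ≤ pvCapacity then c                    -- break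
    else if PySem.List.pyGetD c i 0 = 1 then
      pvLoopB rest (total - w) (PySem.List.pySetD c i 0)
    else pvLoopB rest total c

def repair_chromosome_alt (chromosome : List Int) : List Int :=
  pvLoopB (PySem.List.enumerate (PySem.List.slice pvWeights none (some (chromosome.length : Int))) 0)
    (pvWeightedSum chromosome) chromosome

-- ===== PRECONDITION & SPEC =====
-- Pre_ excludes exactly the inputs on which A raises IndexError: a first-five weighted sum over
-- the capacity together with a gene equal to 1 beyond index 4 (min's key then indexes past the
-- five-element tables).
def Pre_repair_chromosome (chromosome : List Int) : Prop :=
  pvWeightedSum chromosome ≤ pvCapacity ∨ ∀ g ∈ chromosome.drop 5, g ≠ 1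
instance (chromosome : List Int) : Decidable (Pre_repair_chromosome chromosome) := by
  unfold Pre_repair_chromosome; infer_instance
def pvWitness_repair_chromosome : List Int := [1, 1, 1]

def Spec_repair_chromosome (chromosome : List Int) (out : List Int) : Prop :=
  out = repair_chromosome_alt chromosome
instance (chromosome : List Int) (out : List Int) : Decidable (Spec_repair_chromosome chromosome out) := by
  unfold Spec_repair_chromosome; infer_instance

-- ===== CLAIM (what is proved, stated in full; the proofs are below) =====
def Claim_equal_repair_chromosome : Prop := ∀ (chromosome : List Int),
  Dom_repair_chromosome chromosome → Pre_repair_chromosome chromosome →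
  Spec_repair_chromosome chromosome (repair_chromosome chromosome)

-- ===== LEMMAS AND PROOFS =====

lemma pv_key_mono (a b : Int) (ha : 0 ≤ a) (hab : a < b) (hb : b < 5) : pvKey a < pvKey b := by
  have hb0 : (0:Int) < b := lt_of_le_of_lt ha hab
  interval_cases b <;> interval_cases a <;>
    norm_num [pvKey, pvValues, pvWeights, PySem.List.pyGetD, PySem.List.pyIdx?, Int.toNat]

lemma pv_mem_pvOnes (cs : List Int) (x : Int) :
    x ∈ pvOnes cs ↔ ∃ j : Nat, ∃ hj : j < cs.length, cs[j] = 1 ∧ x = (j : Int) := by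
  simp only [pvOnes, List.mem_filterMap, PySem.List.mem_enumerate_iff]
  constructor
  · rintro ⟨⟨i, g⟩, ⟨k, hk, hpk⟩, hif⟩
    cases hpk
    by_cases h1 : cs[k] = 1
    · exact ⟨k, hk, h1, by simp [h1] at hif; omega⟩
    · simp [h1] at hif
  · rintro ⟨j, hj, h1, rfl⟩
    exact ⟨((j:Int), cs[j]), ⟨j, hj, by simp⟩, by simp [h1]⟩

lemma pv_ones_nil (cs : List Int) (h : ∀ (j : Nat) (hj : j < cs.length), cs[j] ≠ 1) :
    pvOnes cs = [] := by
  rw [List.eq_nil_iff_forall_not_mem]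
  intro x hx
  rcases (pv_mem_pvOnes cs x).1 hx with ⟨j, hj, h1, rfl⟩
  exact h j hj h1

lemma pv_sum_eq (cs w : List Int) (a : Int) :
    (cs.zip w).foldl (fun s p => s + p.1 * p.2) a
      = a + ((cs.zip w).map (fun p => p.1 * p.2)).sum := by
  induction cs.zip w generalizing a with
  | nil => simp
  | cons p t ih => simp [ih]; ring

lemma pv_sum_set (cs w : List Int) : ∀ (k : Nat), k < cs.length → k < w.length →
    (((cs.set k 0).zip w).map (fun p => p.1 * p.2)).sum
      = ((cs.zip w).map (fun p => p.1 * p.2)).sum - cs.getD k 0 * w.getD k 0 := by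
  induction cs generalizing w with
  | nil => intro k hk; simp at hk
  | cons x xs ih =>
    intro k hk hw
    cases w with
    | nil => simp at hw
    | cons y ys =>
      cases k with
      | zero =>
        simp only [List.set_cons_zero, List.zip_cons_cons, List.map_cons, List.sum_cons,
          List.getD_cons_zero]
        ring
      | succ m =>
        simp only [List.set_cons_succ, List.zip_cons_cons, List.map_cons, List.sum_cons,
          List.getD_cons_succ]
        have := ih ys m (by simpa using hk) (by simpa using hw)
        omega

lemma pv_ws_set (cs : List Int) (k : Nat) (hk : k < cs.length) (hk5 : k < 5) (h1 : cs[k] = 1) :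
    pvWeightedSum (cs.set k 0) = pvWeightedSum cs - pvWeights.getD k 0 := by
  unfold pvWeightedSum
  rw [pv_sum_eq, pv_sum_eq, pv_sum_set cs pvWeights k hk (by simp [pvWeights]; omega)]
  have : cs.getD k 0 = 1 := by rw [List.getD_eq_getElem cs 0 hk, h1]
  rw [this]
  ring

lemma pv_count_set (cs : List Int) : ∀ (k : Nat), k < cs.length → cs.getD k 0 = 1 →
    (cs.set k 0).count 1 + 1 = cs.count 1 := by
  induction cs with
  | nil => intro k hk; simp at hk
  | cons x xs ih =>
    intro k hk h1
    cases k with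
    | zero => simp_all
    | succ m =>
      have h1' : xs.getD m 0 = 1 := by simpa using h1
      have := ih m (by simpa using hk) h1'
      simp only [List.set_cons_succ, List.count_cons]
      omega

lemma pv_drop_enum_nil (m k : Nat) (h : min m 5 ≤ k) :
    (PySem.List.enumerate (pvWeights.take m) 0).drop k = [] := by
  apply List.drop_eq_nil_of_le
  simp [PySem.List.length_enumerate, pvWeights]
  omega

lemma pv_drop_enum_cons (m k : Nat) (h : k < min m 5) :
    (PySem.List.enumerate (pvWeights.take m) 0).drop k
      = ((k : Int), pvWeights.getD k 0) :: (PySem.List.enumerate (pvWeights.take m) 0).drop (k + 1) := by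
  have hlen : k < (PySem.List.enumerate (pvWeights.take m) 0).length := by
    simp [PySem.List.length_enumerate, pvWeights]; omega
  rw [List.drop_eq_getElem_cons hlen]
  congr 1
  rw [PySem.List.getElem_enumerate]
  have hk : k < pvWeights.length := by simp [pvWeights]; omega
  simp [List.getElem_take, List.getD_eq_getElem?_getD, List.getElem?_eq_getElem hk]

lemma pv_loopA_ones_nil (fuel : Nat) (cs : List Int) (h : pvOnes cs = []) :
    pvLoopA fuel cs = cs := by
  cases fuel with
  | zero => rfl
  | succ f =>
    simp only [pvLoopA, h]
    split
    · rfl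
    · rfl

lemma pv_main : ∀ (d k : Nat) (cs : List Int) (fuel : Nat),
    min cs.length 5 ≤ k + d →
    cs.count 1 < fuel →
    (∀ (j : Nat) (hj : j < cs.length), (j < k ∨ 5 ≤ j) → cs[j] ≠ 1) →
    pvLoopA fuel cs = pvLoopB ((PySem.List.enumerate (pvWeights.take cs.length) 0).drop k)
      (pvWeightedSum cs) cs := by
  intro d
  induction d with
  | zero =>
    intro k cs fuel hd hf H
    rw [pv_drop_enum_nil cs.length k (by omega)]
    have hnil : pvOnes cs = [] := by
      apply pv_ones_nil
      intro j hj
      apply H j hj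
      omega
    rw [pv_loopA_ones_nil fuel cs hnil]
    rfl
  | succ d ih =>
    intro k cs fuel hd hf H
    by_cases hk : min cs.length 5 ≤ k
    · -- same as the base case: the pair list is exhausted
      rw [pv_drop_enum_nil cs.length k hk]
      have hnil : pvOnes cs = [] := by
        apply pv_ones_nil
        intro j hj
        apply H j hj
        omega
      rw [pv_loopA_ones_nil fuel cs hnil]
      rfl
    · rw [not_le] at hk
      have hk' : k < cs.length := by omega
      have hk5 : k < 5 := by omega
      rw [pv_drop_enum_cons cs.length k hk]
      simp only [pvLoopB]
      by_cases hws : pvCapacity < pvWeightedSum cs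
      · rw [if_neg (by omega)]
        by_cases h1 : cs[k] = 1
        · -- removal step: A's min-by-ratio picks exactly index k
          have hkmem : ((k:Nat) : Int) ∈ pvOnes cs := (pv_mem_pvOnes cs _).2 ⟨k, hk', h1, rfl⟩
          have hne : pvOnes cs ≠ [] := fun h => by simp [h] at hkmem
          cases hmin : PySem.List.min? (pvOnes cs) pvKey with
          | none => exact absurd ((PySem.List.min?_eq_none_iff _ _).1 hmin) hne
          | some m =>
            have hm := PySem.List.min?_mem hmin
            rcases (pv_mem_pvOnes cs m).1 hm with ⟨j, hj, hj1, rfl⟩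
            have hjk : k ≤ j := by
              by_contra hlt
              exact H j hj (Or.inl (by omega)) hj1
            have hj5 : j < 5 := by
              by_contra hge
              exact H j hj (Or.inr (by omega)) hj1
            have hjek : j = k := by
              by_contra hne'
              have hkj : (k : Int) < (j : Int) := by
                have : k < j := by omega
                exact_mod_cast this
              have hlt := pv_key_mono (k : Int) (j : Int) (by positivity) hkj (by exact_mod_cast hj5)
              have hle := PySem.List.min?_isMin hmin ((k:Nat):Int) hkmem
              exact absurd hle (by exact not_le.2 hlt)
            subst hjek
            cases fuel with
            | zero => omega
            | succ f =>
              simp only [pvLoopA]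
              rw [if_pos hws, hmin]
              simp only [PySem.List.pySetD_natCast]
              have hgd : PySem.List.pyGetD cs ((j:Nat):Int) 0 = 1 := by
                rw [PySem.List.pyGetD_natCast, List.getD_eq_getElem cs 0 hj, hj1]
              rw [if_pos hgd]
              have hcount : (cs.set j 0).count 1 < f := by
                have := pv_count_set cs j hj (by rw [List.getD_eq_getElem cs 0 hj, hj1])
                omega
              have hset := ih (j+1) (cs.set j 0) f
                (by rw [List.length_set]; omega) hcount
                (by
                  intro i hi hii
                  rw [List.length_set] at hi
                  rw [List.getElem_set]
                  split
                  · omega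
                  · exact H i hi (by omega))
              rw [List.length_set] at hset
              rw [hset, pv_ws_set cs j hj (by omega) hj1]
        · -- skip step: gene at k is not 1, B moves on, A's state is unchanged
          have hgd : ¬ (PySem.List.pyGetD cs ((k:Nat):Int) 0 = 1) := by
            rw [PySem.List.pyGetD_natCast, List.getD_eq_getElem cs 0 hk']
            exact h1
          rw [if_neg hgd]
          exact ih (k+1) cs fuel (by omega) hf
            (by
              intro i hi hii
              rcases hii with hii | hii
              · by_cases hik : i = k
                · subst hik; exact h1
                · exact H i hi (Or.inl (by omega))
              · exact H i hi (Or.inr hii))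
      · -- weight already within capacity: both sides stop with cs
        rw [if_pos (by omega)]
        cases fuel with
        | zero => omega
        | succ f =>
          simp only [pvLoopA]
          rw [if_neg hws]

-- ===== VERDICT (by name: the statement is the Claim_ definition above) =====
theorem repair_chromosome_spec : Claim_equal_repair_chromosome := by
  intro cs _ hpre
  unfold Spec_repair_chromosome repair_chromosome repair_chromosome_alt
  rw [PySem.List.slice_to_natCast]
  by_cases hws : pvCapacity < pvWeightedSum cs
  · have hdrop : ∀ g ∈ cs.drop 5, g ≠ 1 := by
      rcases hpre with h | h
      · omega
      · exact h
    have := pv_main 5 0 cs (cs.length + 1) (by omega)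
      (by have := cs.count_le_length (a := 1); omega)
      (by
        intro j hj hjj
        rcases hjj with hjj | hjj
        · omega
        · intro h1
          have hsome : (cs.drop 5)[j-5]? = some cs[j] := by
            rw [List.getElem?_drop, show 5 + (j-5) = j from by omega,
              List.getElem?_eq_getElem hj]
          exact hdrop cs[j] (List.mem_of_getElem? hsome) h1)
    rw [List.drop_zero] at this
    exact this
  · cases henum : PySem.List.enumerate (pvWeights.take cs.length) 0 with
    | nil =>
      simp only [pvLoopA]
      rw [if_neg hws]
      rfl
    | cons p rest =>
      cases p with
      | mk i w =>
        simp only [pvLoopA, pvLoopB]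
        rw [if_neg hws, if_pos (by omega)]
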